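-- pv_equiv track=rewrite | github.com/yooncoderhere/2025_CT_Study | jiyun/[1]array_hash/13414_수강신청.py | course_registration
-- ===== SOURCE A (Python) =====
-- def course_registration(k, l, student_ids):
--     student_dict = {}  # {학번: 마지막 신청 순서}
--
--     for student_id in student_ids:
--         if student_id in student_dict:
--             del student_dict[student_id]  # 기존 학번 삭제 (맨 뒤로 보내기 위해)
--         student_dict[student_id] = True  # 최신 신청 순서로 추가
--
--     # 수강 신청이 가능한 K명의 학번 출력
--     registered_students = list(student_dict.keys())[:k]
--     return registered_students
-- ===== SOURCE B (Python) =====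
-- def course_registration(k, l, student_ids):
--     seen = set()
--     rev = []
--     for sid in reversed(list(student_ids)):
--         if sid not in seen:
--             seen.add(sid)
--             rev.append(sid)
--     ordered = rev[::-1]
--     return ordered[:k]
-- ===== Notes on version B (the rewrite author's own statement) =====
-- stated objective: idiomatic
-- what changed: Instead of simulating dict move-to-end by del/re-insert for every id, B makes a single reverse pass keeping the first (i.e. last in original order) occurrence of each id with a seen-set, reverses, and slices.
import Mathlib
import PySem

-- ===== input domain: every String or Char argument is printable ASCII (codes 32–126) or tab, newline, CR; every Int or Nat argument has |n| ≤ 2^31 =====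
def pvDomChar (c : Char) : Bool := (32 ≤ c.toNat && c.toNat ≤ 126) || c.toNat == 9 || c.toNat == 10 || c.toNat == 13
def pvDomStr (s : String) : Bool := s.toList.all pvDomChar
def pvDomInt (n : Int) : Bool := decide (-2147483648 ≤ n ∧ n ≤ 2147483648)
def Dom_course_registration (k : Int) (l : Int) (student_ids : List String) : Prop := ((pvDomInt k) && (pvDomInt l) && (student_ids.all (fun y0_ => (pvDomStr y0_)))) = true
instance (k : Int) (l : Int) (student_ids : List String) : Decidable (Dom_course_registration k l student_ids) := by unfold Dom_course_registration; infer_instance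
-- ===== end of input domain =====

-- B replaces A's dict del/re-insert move-to-end simulation by one reverse pass with a seen-set (keep first occurrence in reverse = last occurrence), then reverse and slice; idiomatic, same behaviour.


-- ===== PORT A =====
-- A's loop body: if student_id in student_dict: del student_dict[student_id]; student_dict[student_id] = True
def stepA (d : PySem.Dict String Bool) (student_id : String) : PySem.Dict String Bool :=
  (if d.contains student_id then d.erase student_id else d).insert student_id true

def course_registration (k : Int) (l : Int) (student_ids : List String) : List String :=
  let student_dict := student_ids.foldl stepA PySem.Dict.empty
  PySem.List.slice student_dict.keys none (some k)                      -- list(student_dict.keys())[:k]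

-- ===== PORT B =====
-- B's loop body: if sid not in seen: seen.add(sid); rev.append(sid)
def stepB (p : PySem.Set String × List String) (sid : String) : PySem.Set String × List String :=
  if p.1.contains sid then p else (PySem.Set.add p.1 sid, p.2 ++ [sid])

def course_registration_alt (k : Int) (l : Int) (student_ids : List String) : List String :=
  let st := student_ids.reverse.foldl stepB (PySem.Set.empty, [])       -- for sid in reversed(list(student_ids))
  PySem.List.slice st.2.reverse none (some k)                           -- ordered = rev[::-1]; ordered[:k]

-- ===== PRECONDITION & SPEC =====
def Spec_course_registration (k : Int) (l : Int) (student_ids : List String) (out : List String) : Prop := out = course_registration_alt k l student_ids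
instance (k : Int) (l : Int) (student_ids : List String) (out : List String) : Decidable (Spec_course_registration k l student_ids out) := by unfold Spec_course_registration; infer_instance

-- ===== CLAIM (what is proved, stated in full; the proofs are below) =====
def Claim_equal_course_registration : Prop := ∀ (k : Int) (l : Int) (student_ids : List String), Dom_course_registration k l student_ids → Spec_course_registration k l student_ids (course_registration k l student_ids)

-- ===== LEMMAS AND PROOFS =====

-- last-occurrence dedup of a list: keep an element iff it does not occur later
def lastDedup : List String → List String
  | [] => []
  | x :: xs => if x ∈ xs then lastDedup xs else x :: lastDedup xs

lemma keys_erase (d : PySem.Dict String Bool) (x : String) :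
    (d.erase x).keys = d.keys.filter (fun y => !(y == x)) := by
  simp only [PySem.Dict.erase, PySem.Dict.keys]
  induction d.items with
  | nil => rfl
  | cons p l ih =>
    by_cases h : p.1 = x <;> simp [h, ih]

lemma keys_stepA (d : PySem.Dict String Bool) (x : String) :
    (stepA d x).keys = d.keys.filter (fun y => !(y == x)) ++ [x] := by
  unfold stepA
  by_cases h : d.contains x = true
  · have hc : (d.erase x).contains x = false := by
      simp only [PySem.Dict.contains, PySem.Dict.erase, List.any_filter]
      simp
    rw [if_pos h, PySem.Dict.keys_insert_of_not_contains _ _ hc, keys_erase]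
  · have h' : d.contains x = false := by simpa using h
    have hx : x ∉ d.keys := by
      intro hm; exact h ((PySem.Dict.contains_iff_mem_keys d x).mpr hm)
    rw [if_neg h, PySem.Dict.keys_insert_of_not_contains _ _ h']
    congr 1
    refine (List.filter_eq_self.mpr ?_).symm
    intro y hy
    simp only [Bool.not_eq_eq_eq_not, Bool.not_true, beq_eq_false_iff_ne]
    exact fun hyx => hx (hyx ▸ hy)

lemma foldl_stepA_keys : ∀ (xs : List String) (d : PySem.Dict String Bool),
    (xs.foldl stepA d).keys = d.keys.filter (fun y => !(xs.contains y)) ++ lastDedup xs := by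
  intro xs
  induction xs with
  | nil => intro d; simp [lastDedup]
  | cons x xs ih =>
    intro d
    rw [List.foldl_cons, ih, keys_stepA, List.filter_append, List.filter_filter]
    have h2 : ∀ y : String, ((!(xs.contains y)) && !(y == x)) = !((x :: xs).contains y) := by
      intro y
      by_cases h : y = x <;> by_cases h' : y ∈ xs <;> simp [h, h']
    by_cases hx : x ∈ xs
    · have : lastDedup (x :: xs) = lastDedup xs := by simp [lastDedup, hx]
      rw [this]
      have h1 : (List.filter (fun y => !(xs.contains y)) [x]) = [] := by simp [hx]
      simp only [h1, List.append_nil]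
      congr 1
      apply List.filter_congr; intro y _; exact h2 y
    · have : lastDedup (x :: xs) = x :: lastDedup xs := by simp [lastDedup, hx]
      rw [this]
      have h1 : (List.filter (fun y => !(xs.contains y)) [x]) = [x] := by simp [hx]
      rw [h1]
      have hassoc : ∀ (a : List String), a ++ [x] ++ lastDedup xs = a ++ (x :: lastDedup xs) := by
        intro a; simp
      rw [hassoc]
      congr 1
      apply List.filter_congr; intro y _; exact h2 y

lemma ofList_append_singleton (l : List String) (x : String) :
    PySem.Set.ofList (l ++ [x]) = PySem.Set.add (PySem.Set.ofList l) x := by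
  rw [PySem.Set.ofList_eq_foldl, PySem.Set.ofList_eq_foldl, List.foldl_append]
  rfl

lemma foldl_stepB : ∀ (xs : List String),
    xs.reverse.foldl stepB (PySem.Set.empty, []) =
      (PySem.Set.ofList xs.reverse, (lastDedup xs).reverse) := by
  intro xs
  induction xs with
  | nil => rfl
  | cons x xs ih =>
    rw [List.reverse_cons, List.foldl_append, ih]
    have hcontains : (PySem.Set.ofList xs.reverse).contains x = decide (x ∈ xs) := by
      simp only [PySem.Set.contains]
      by_cases h : x ∈ xs <;> simp [PySem.Set.mem_ofList, h]
    by_cases h : x ∈ xs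
    · have hstep : stepB (PySem.Set.ofList xs.reverse, (lastDedup xs).reverse) x =
          (PySem.Set.ofList xs.reverse, (lastDedup xs).reverse) := by
        unfold stepB; rw [hcontains]; simp [h]
      rw [List.foldl_cons, List.foldl_nil, hstep]
      have hof : PySem.Set.ofList (xs.reverse ++ [x]) = PySem.Set.ofList xs.reverse := by
        rw [ofList_append_singleton]
        simp [PySem.Set.add, PySem.Set.contains, PySem.Set.mem_ofList, h]
      rw [hof]
      simp [lastDedup, h]
    · have hstep : stepB (PySem.Set.ofList xs.reverse, (lastDedup xs).reverse) x =
          (PySem.Set.add (PySem.Set.ofList xs.reverse) x, (lastDedup xs).reverse ++ [x]) := by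
        unfold stepB; rw [hcontains]; simp [h]
      rw [List.foldl_cons, List.foldl_nil, hstep, ofList_append_singleton]
      simp [lastDedup, h]

-- ===== VERDICT (by name: the statement is the Claim_ definition above) =====
theorem course_registration_spec : Claim_equal_course_registration := by
  intro k l student_ids _
  unfold Spec_course_registration course_registration course_registration_alt
  simp only [foldl_stepA_keys, foldl_stepB, PySem.Dict.keys_empty]
  simp
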